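-- pv_equiv track=rewrite | github.com/sfailsthy/experiment | Compile principle/LL-1/grammar_updated.py | str_to_arr
-- ===== SOURCE A (Python) =====
-- def str_to_arr(body):
--     res = []
--     i = 0
--     while i < len(body):
--         if i == len(body) - 1:
--             res.append(body[i])
--             i += 1
--         else:
--             if body[i + 1] == "'":
--                 res.append(body[i] + body[i + 1])
--                 i += 2
--             else:
--                 res.append(body[i])
--                 i += 1
--     return res
-- ===== SOURCE B (Python) =====
-- def str_to_arr(body):
--     res = []
--     pending = None  # last seen character, not yet emitted, may still take a prime
--     for c in body:
--         if c == "'" and pending is not None: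
--             res.append(pending + c)
--             pending = None
--         else:
--             if pending is not None:
--                 res.append(pending)
--             pending = c
--     if pending is not None:
--         res.append(pending)
--     return res
-- ===== Notes on version B (the rewrite author's own statement) =====
-- stated objective: simpler
-- what changed: Replaced the index-arithmetic while-loop with lookahead body[i+1] by a single left-to-right for-loop over the characters that keeps one pending character and attaches a following apostrophe to it.
import Mathlib
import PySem

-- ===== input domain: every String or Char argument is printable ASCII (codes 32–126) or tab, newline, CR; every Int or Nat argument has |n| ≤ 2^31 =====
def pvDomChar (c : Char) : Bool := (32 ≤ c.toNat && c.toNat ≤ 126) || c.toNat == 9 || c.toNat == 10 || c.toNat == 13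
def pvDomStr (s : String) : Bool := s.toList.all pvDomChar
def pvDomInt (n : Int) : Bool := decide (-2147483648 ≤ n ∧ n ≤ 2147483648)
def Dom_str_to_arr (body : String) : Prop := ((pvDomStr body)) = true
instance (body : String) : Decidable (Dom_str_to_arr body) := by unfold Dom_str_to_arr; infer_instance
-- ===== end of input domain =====

-- B replaces A's index-arithmetic while-loop (with lookahead body[i+1]) by a single
-- pending-character pass; equivalence is proved for all inputs (both are total).

-- ===== PORT A =====
-- A's while-loop over index i with result list res, step for step.
def str_to_arr_loop (cs : List Char) (i : Nat) : List String :=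
  if h : i < cs.length then
    if hl : i = cs.length - 1 then
      String.ofList [cs[i]] :: str_to_arr_loop cs (i + 1)
    else
      if cs[i + 1]'(by omega) = '\'' then
        String.ofList [cs[i], cs[i + 1]'(by omega)] :: str_to_arr_loop cs (i + 2)
      else
        String.ofList [cs[i]] :: str_to_arr_loop cs (i + 1)
  else []
termination_by cs.length - i

def str_to_arr (body : String) : List String := str_to_arr_loop body.toList 0

-- ===== PORT B =====
-- B's for-loop over the characters, carrying (pending, res).
def str_to_arr_alt_loop : List Char → Option String → List String → List String
  | [], pending, res =>
    match pending with
    | none => res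
    | some p => res ++ [p]
  | c :: cs, pending, res =>
    match pending with
    | some p =>
      if c = '\'' then str_to_arr_alt_loop cs none (res ++ [p.push c])
      else str_to_arr_alt_loop cs (some (String.ofList [c])) (res ++ [p])
    | none => str_to_arr_alt_loop cs (some (String.ofList [c])) res

def str_to_arr_alt (body : String) : List String := str_to_arr_alt_loop body.toList none []

-- ===== PRECONDITION & SPEC =====
def Spec_str_to_arr (body : String) (out : List String) : Prop := out = str_to_arr_alt body
instance (body : String) (out : List String) : Decidable (Spec_str_to_arr body out) := by unfold Spec_str_to_arr; infer_instance

-- ===== CLAIM (what is proved, stated in full; the proofs are below) =====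
def Claim_equal_str_to_arr : Prop := ∀ (body : String), Dom_str_to_arr body → Spec_str_to_arr body (str_to_arr body)

-- ===== LEMMAS AND PROOFS =====

-- clean pairwise tokenisation both loops compute
def pvTok : List Char → List String
  | [] => []
  | [c] => [String.ofList [c]]
  | c1 :: c2 :: rest =>
    if c2 = '\'' then String.ofList [c1, c2] :: pvTok rest
    else String.ofList [c1] :: pvTok (c2 :: rest)

set_option maxRecDepth 4000 in
lemma loopA_eq_tok (cs : List Char) (i : Nat) : str_to_arr_loop cs i = pvTok (cs.drop i) := by
  refine str_to_arr_loop.induct cs (fun j => str_to_arr_loop cs j = pvTok (cs.drop j))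
    ?_ ?_ ?_ ?_ i
  · intro h ih
    rw [str_to_arr_loop]
    have h1 : cs.drop (cs.length - 1) = cs[cs.length - 1] :: cs.drop (cs.length - 1 + 1) :=
      List.drop_eq_getElem_cons h
    have h2 : cs.drop (cs.length - 1 + 1) = [] := List.drop_eq_nil_of_le (by omega)
    simp [h, h1, h2, ih, pvTok]
  · intro x h hl hq ih
    rw [str_to_arr_loop]
    have hi1 : x + 1 < cs.length := by omega
    have h1 : cs.drop x = cs[x] :: cs.drop (x + 1) := List.drop_eq_getElem_cons h
    have h2 : cs.drop (x + 1) = cs[x + 1] :: cs.drop (x + 2) := List.drop_eq_getElem_cons hi1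
    simp [h, hl, hq, h1, h2, ih, pvTok]
  · intro x h hl hq ih
    rw [str_to_arr_loop]
    have hi1 : x + 1 < cs.length := by omega
    have h1 : cs.drop x = cs[x] :: cs.drop (x + 1) := List.drop_eq_getElem_cons h
    have h2 : cs.drop (x + 1) = cs[x + 1] :: cs.drop (x + 2) := List.drop_eq_getElem_cons hi1
    rw [h1, h2, pvTok, if_neg hq, ← h2, ← ih]
    simp [h, hl, hq]
  · intro x h
    rw [str_to_arr_loop]
    simp [h, List.drop_eq_nil_of_le (by omega : cs.length ≤ x), pvTok]

lemma loopB_eq_tok (cs : List Char) :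
    (∀ res, str_to_arr_alt_loop cs none res = res ++ pvTok cs) ∧
    (∀ c res, str_to_arr_alt_loop cs (some (String.ofList [c])) res = res ++ pvTok (c :: cs)) := by
  induction cs with
  | nil =>
    refine ⟨fun res => by simp [str_to_arr_alt_loop, pvTok], fun c res => by
      simp [str_to_arr_alt_loop, pvTok]⟩
  | cons c2 rest ih =>
    refine ⟨fun res => ?_, fun c res => ?_⟩
    · rw [str_to_arr_alt_loop]
      exact ih.2 c2 res
    · rw [str_to_arr_alt_loop]
      by_cases hq : c2 = '\''
      · subst hq
        have hpush : (String.ofList [c]).push '\'' = String.ofList [c, '\''] := by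
          apply String.toList_injective
          simp
        simp only [hpush, ih.1, pvTok]
        simp
      · simp only [if_neg hq, ih.2, pvTok]
        simp

-- ===== VERDICT (by name: the statement is the Claim_ definition above) =====
theorem str_to_arr_spec : Claim_equal_str_to_arr := by
  intro body _
  unfold Spec_str_to_arr str_to_arr str_to_arr_alt
  rw [loopA_eq_tok, (loopB_eq_tok body.toList).1]
  simp
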